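-- pv_equiv track=rewrite | github.com/ssecurityy/AppsecD | backend/app/services/payload_intelligence.py | filter_payloads_for_stack
-- ===== SOURCE A (Python) =====
-- STACK_PAYLOAD_MAP = {
--     "postgresql": ["pg_sleep", "pg_sleep(", "postgres", "::", "cast("],
--     "mysql": ["sleep(", "benchmark(", "mysql", "concat("],
--     "mssql": ["waitfor", "mssql", "char("],
--     "mongodb": ["$gt", "$where", "mongodb", "nosql"],
--     "graphql": ["graphql", "__schema", "introspection"],
--     "jwt": ["jwt", "eyJ", "alg", "none"],
--     "xml": ["xxe", "<!entity", "<?xml"],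
--     "php": ["php", "phpinfo", "<?php"],
-- }
--
-- def filter_payloads_for_stack(payloads: list, stack: dict) -> list:
--     """
--     Filter and reorder payloads to prioritize those matching the project stack.
--     Returns payloads with stack-relevant ones first.
--     """
--     if not payloads:
--         return payloads
--
--     stack_str = _stack_to_search_string(stack)
--     relevant = []
--     other = []
--     for p in payloads:
--         p_str = str(p).lower()
--         if _matches_stack(p_str, stack_str):
--             relevant.append(p)
--         else:
--             other.append(p)
--     return relevant + other if relevant else payloads
--
-- def _stack_to_search_string(stack: dict) -> str:
--     parts = []
--     for k, v in (stack or {}).items():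
--         if isinstance(v, list):
--             parts.extend(str(x).lower() for x in v)
--         else:
--             parts.append(str(v).lower())
--     return " ".join(parts)
--
-- def _matches_stack(payload_str: str, stack_str: str) -> bool:
--     """Check if payload is relevant to stack."""
--     payload_lower = payload_str.lower()
--     if "postgresql" in stack_str or "postgres" in stack_str:
--         if any(kw in payload_lower for kw in STACK_PAYLOAD_MAP["postgresql"]):
--             return True
--     if "mysql" in stack_str:
--         if any(kw in payload_lower for kw in STACK_PAYLOAD_MAP["mysql"]):
--             return True
--     if "mssql" in stack_str or "sql server" in stack_str:
--         if any(kw in payload_lower for kw in STACK_PAYLOAD_MAP["mssql"]):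
--             return True
--     if "mongodb" in stack_str or "mongo" in stack_str:
--         if any(kw in payload_lower for kw in STACK_PAYLOAD_MAP["mongodb"]):
--             return True
--     if "graphql" in stack_str:
--         if any(kw in payload_lower for kw in STACK_PAYLOAD_MAP["graphql"]):
--             return True
--     if "jwt" in stack_str:
--         if any(kw in payload_lower for kw in STACK_PAYLOAD_MAP["jwt"]):
--             return True
--     if "xml" in stack_str or "soap" in stack_str:
--         if any(kw in payload_lower for kw in STACK_PAYLOAD_MAP["xml"]):
--             return True
--     if "php" in stack_str:
--         if any(kw in payload_lower for kw in STACK_PAYLOAD_MAP["php"]):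
--             return True
--     return False
-- ===== SOURCE B (Python) =====
-- STACK_PAYLOAD_MAP = {
--     "postgresql": ["pg_sleep", "pg_sleep(", "postgres", "::", "cast("],
--     "mysql": ["sleep(", "benchmark(", "mysql", "concat("],
--     "mssql": ["waitfor", "mssql", "char("],
--     "mongodb": ["$gt", "$where", "mongodb", "nosql"],
--     "graphql": ["graphql", "__schema", "introspection"],
--     "jwt": ["jwt", "eyJ", "alg", "none"],
--     "xml": ["xxe", "<!entity", "<?xml"],
--     "php": ["php", "phpinfo", "<?php"],
-- }
--
-- # trigger-substrings of the stack string -> keyword group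
-- _TRIGGERS = [
--     (("postgresql", "postgres"), STACK_PAYLOAD_MAP["postgresql"]),
--     (("mysql",), STACK_PAYLOAD_MAP["mysql"]),
--     (("mssql", "sql server"), STACK_PAYLOAD_MAP["mssql"]),
--     (("mongodb", "mongo"), STACK_PAYLOAD_MAP["mongodb"]),
--     (("graphql",), STACK_PAYLOAD_MAP["graphql"]),
--     (("jwt",), STACK_PAYLOAD_MAP["jwt"]),
--     (("xml", "soap"), STACK_PAYLOAD_MAP["xml"]),
--     (("php",), STACK_PAYLOAD_MAP["php"]),
-- ]
--
--
-- def filter_payloads_for_stack(payloads: list, stack: dict) -> list: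
--     # One stable sort by a boolean relevance key: relevant payloads (key False)
--     # come first, everything else keeps its original order.  No partition loop,
--     # and the empty-payloads / nothing-relevant cases need no special guards.
--     stack_str = " ".join(str(v).lower() for v in (stack or {}).values())
--     keywords = [kw
--                 for triggers, kws in _TRIGGERS
--                 if any(t in stack_str for t in triggers)
--                 for kw in kws]
--     return sorted(payloads,
--                   key=lambda p: not any(kw in str(p).lower() for kw in keywords))
-- ===== Notes on version B (the rewrite author's own statement) =====
-- stated objective: simpler
-- what changed: B replaces A's two-accumulator partition loop and its two special-case guards (empty payloads, empty relevant) with a single stable sort by a boolean relevance key over a keyword list precomputed once from a trigger table; sort stability makes both special cases fall out, and hoisting the trigger scans out of the per-payload loop removes A's repeated stack-string searches.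
import Mathlib
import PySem

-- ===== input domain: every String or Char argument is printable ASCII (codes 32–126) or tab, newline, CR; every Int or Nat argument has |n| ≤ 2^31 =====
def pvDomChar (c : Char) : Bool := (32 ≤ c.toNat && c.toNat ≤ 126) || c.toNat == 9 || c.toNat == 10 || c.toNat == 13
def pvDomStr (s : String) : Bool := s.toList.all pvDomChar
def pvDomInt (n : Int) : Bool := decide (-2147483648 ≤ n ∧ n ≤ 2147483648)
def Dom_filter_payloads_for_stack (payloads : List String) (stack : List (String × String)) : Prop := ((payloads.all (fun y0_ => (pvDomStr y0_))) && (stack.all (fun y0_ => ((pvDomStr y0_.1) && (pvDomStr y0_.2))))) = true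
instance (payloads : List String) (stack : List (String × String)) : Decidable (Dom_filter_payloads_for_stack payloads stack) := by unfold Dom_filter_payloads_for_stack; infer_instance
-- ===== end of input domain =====

-- B replaces A's two-accumulator partition loop and its two special-case guards by ONE stable
-- sort over a boolean relevance key, with the applicable keywords precomputed once (objective: simpler).

-- ===== PORT A =====
-- the STACK_PAYLOAD_MAP entries (module constants, shared by both versions)
def kwPostgres : List String := ["pg_sleep", "pg_sleep(", "postgres", "::", "cast("]
def kwMysql : List String := ["sleep(", "benchmark(", "mysql", "concat("]
def kwMssql : List String := ["waitfor", "mssql", "char("]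
def kwMongo : List String := ["$gt", "$where", "mongodb", "nosql"]
def kwGraphql : List String := ["graphql", "__schema", "introspection"]
def kwJwt : List String := ["jwt", "eyJ", "alg", "none"]
def kwXml : List String := ["xxe", "<!entity", "<?xml"]
def kwPhp : List String := ["php", "phpinfo", "<?php"]

-- _stack_to_search_string (values here are always str, so the isinstance-list branch is dead;
-- str(v) on a str is v)
def stackToSearchString (stack : List (String × String)) : String :=
  PySem.Str.join " " (stack.map (fun kv => PySem.Str.lower kv.2))

-- _matches_stack: a chain of 'if trigger in stack_str: if any(kw in payload_lower): return True'
def matchesStack (payload_str stack_str : String) : Bool :=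
  let pl := PySem.Str.lower payload_str
  ((PySem.Str.isIn "postgresql" stack_str || PySem.Str.isIn "postgres" stack_str) &&
     kwPostgres.any (fun kw => PySem.Str.isIn kw pl)) ||
  (PySem.Str.isIn "mysql" stack_str && kwMysql.any (fun kw => PySem.Str.isIn kw pl)) ||
  ((PySem.Str.isIn "mssql" stack_str || PySem.Str.isIn "sql server" stack_str) &&
     kwMssql.any (fun kw => PySem.Str.isIn kw pl)) ||
  ((PySem.Str.isIn "mongodb" stack_str || PySem.Str.isIn "mongo" stack_str) &&
     kwMongo.any (fun kw => PySem.Str.isIn kw pl)) ||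
  (PySem.Str.isIn "graphql" stack_str && kwGraphql.any (fun kw => PySem.Str.isIn kw pl)) ||
  (PySem.Str.isIn "jwt" stack_str && kwJwt.any (fun kw => PySem.Str.isIn kw pl)) ||
  ((PySem.Str.isIn "xml" stack_str || PySem.Str.isIn "soap" stack_str) &&
     kwXml.any (fun kw => PySem.Str.isIn kw pl)) ||
  (PySem.Str.isIn "php" stack_str && kwPhp.any (fun kw => PySem.Str.isIn kw pl))

def filter_payloads_for_stack (payloads : List String) (stack : List (String × String)) : List String :=
  if payloads.isEmpty then payloads
  else
    let stack_str := stackToSearchString stack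
    let ro := payloads.foldl
      (fun (acc : List String × List String) p =>
        let p_str := PySem.Str.lower p
        if matchesStack p_str stack_str then (acc.1 ++ [p], acc.2) else (acc.1, acc.2 ++ [p]))
      ([], [])
    if !ro.1.isEmpty then ro.1 ++ ro.2 else payloads

-- ===== PORT B =====
-- _TRIGGERS: trigger substrings of the stack string -> keyword group
def triggerTable : List (List String × List String) :=
  [(["postgresql", "postgres"], kwPostgres),
   (["mysql"], kwMysql),
   (["mssql", "sql server"], kwMssql),
   (["mongodb", "mongo"], kwMongo),
   (["graphql"], kwGraphql),
   (["jwt"], kwJwt),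
   (["xml", "soap"], kwXml),
   (["php"], kwPhp)]

def filter_payloads_for_stack_alt (payloads : List String) (stack : List (String × String)) : List String :=
  let stack_str := PySem.Str.join " " (stack.map (fun kv => PySem.Str.lower kv.2))
  let keywords := triggerTable.foldl
    (fun acc tk => if tk.1.any (fun t => PySem.Str.isIn t stack_str) then acc ++ tk.2 else acc) []
  -- sorted(payloads, key=lambda p: not any(kw in str(p).lower() for kw in keywords)); stable,
  -- False < True, so relevant payloads come first and order is otherwise preserved
  PySem.List.sorted payloads
    (fun p => !(keywords.any (fun kw => PySem.Str.isIn kw (PySem.Str.lower p)))) false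

-- ===== PRECONDITION & SPEC =====
def Spec_filter_payloads_for_stack (payloads : List String) (stack : List (String × String)) (out : List String) : Prop := out = filter_payloads_for_stack_alt payloads stack
instance (payloads : List String) (stack : List (String × String)) (out : List String) : Decidable (Spec_filter_payloads_for_stack payloads stack out) := by unfold Spec_filter_payloads_for_stack; infer_instance

-- ===== CLAIM (what is proved, stated in full; the proofs are below) =====
def Claim_equal_filter_payloads_for_stack : Prop := ∀ (payloads : List String) (stack : List (String × String)), Dom_filter_payloads_for_stack payloads stack → Spec_filter_payloads_for_stack payloads stack (filter_payloads_for_stack payloads stack)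

-- ===== LEMMAS AND PROOFS =====

theorem toNat_ofNat_small (n : Nat) (h : n < 55296) : (Char.ofNat n).val.toNat = n := by
  unfold Char.ofNat
  rw [dif_pos (Or.inl h)]
  rfl

theorem lowerChar_idem (c : Char) :
    PySem.Chars.lowerChar (PySem.Chars.lowerChar c) = PySem.Chars.lowerChar c := by
  unfold PySem.Chars.lowerChar
  simp only [PySem.Chars.isupper]
  split_ifs with h1 h2 <;> try rfl
  exfalso
  simp only [Char.le_def, UInt32.le_iff_toNat_le, Bool.and_eq_true, decide_eq_true_eq] at h1 h2
  have hA : 'A'.val.toNat = 65 := rfl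
  have hZ : 'Z'.val.toNat = 90 := rfl
  rw [show Char.toNat c = c.val.toNat from rfl,
    toNat_ofNat_small (c.val.toNat + 32) (by omega)] at h2
  omega

theorem lower_idem (s : String) : PySem.Str.lower (PySem.Str.lower s) = PySem.Str.lower s := by
  simp only [PySem.Str.lower, PySem.Chars.lower, String.toList_ofList, List.map_map]
  congr 1
  exact List.map_congr_left (fun c _ => lowerChar_idem c)

theorem any_if_append (c : Bool) (acc kws : List String) (f : String → Bool) :
    ((if c then acc ++ kws else acc).any f) = (acc.any f || (c && kws.any f)) := by
  cases c <;> simp [List.any_append]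

-- A's trigger chain decides the same Bool as 'some keyword of the applicable list matches'
theorem match_eq (ss p : String) :
    matchesStack (PySem.Str.lower p) ss =
      (triggerTable.foldl
        (fun acc tk => if tk.1.any (fun t => PySem.Str.isIn t ss) then acc ++ tk.2 else acc) []).any
        (fun kw => PySem.Str.isIn kw (PySem.Str.lower p)) := by
  simp only [matchesStack, triggerTable, List.foldl_cons, List.foldl_nil, lower_idem,
    any_if_append, List.any_cons, List.any_nil, Bool.or_false, Bool.false_or, Bool.or_assoc]

-- A's two-accumulator loop is the pair of filters
theorem fold_pair (f : String → Bool) (l : List String) (a b : List String) :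
    l.foldl (fun acc p => if f p then (acc.1 ++ [p], acc.2) else (acc.1, acc.2 ++ [p])) (a, b)
      = (a ++ l.filter f, b ++ l.filter (fun p => !f p)) := by
  induction l generalizing a b with
  | nil => simp
  | cons x xs ih =>
    by_cases h : f x <;> simp [h, ih]

-- insertBy places x before the first element it 'befores', after all it does not
theorem insertBy_split {α : Type} (before : α → α → Bool) (x : α) (F T : List α)
    (hF : ∀ y ∈ F, before x y = false) (hT : ∀ y ∈ T, before x y = true) :
    PySem.List.insertBy before x (F ++ T) = F ++ x :: T := by
  induction F with
  | nil =>
    cases T with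
    | nil => rfl
    | cons y ys => simp [PySem.List.insertBy, hT y (by simp)]
  | cons a F' ih =>
    simp only [List.cons_append, PySem.List.insertBy, hF a (by simp), Bool.false_eq_true,
      if_false, List.cons.injEq, true_and]
    exact ih (fun y hy => hF y (by simp [hy])) 

-- the stable insertion sort by a boolean key is 'false-key elements first, both blocks in order'
theorem foldl_insertBy_bool {α : Type} (f : α → Bool) (xs F T : List α)
    (hF : ∀ y ∈ F, f y = true) (hT : ∀ y ∈ T, f y = false) :
    xs.foldl (fun acc x => PySem.List.insertBy (fun a b => decide ((!f a) < (!f b))) x acc) (F ++ T)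
      = (F ++ xs.filter f) ++ (T ++ xs.filter (fun x => !f x)) := by
  induction xs generalizing F T with
  | nil => simp
  | cons x xs ih =>
    simp only [List.foldl_cons]
    by_cases hx : f x = true
    · have h1 := insertBy_split (fun a b => decide ((!f a) < (!f b))) x F T
        (fun y hy => by simp [hx, hF y hy, Bool.lt_iff])
        (fun y hy => by simp [hx, hT y hy, Bool.lt_iff])
      rw [h1, show F ++ x :: T = (F ++ [x]) ++ T by simp]
      have hF' : ∀ y ∈ F ++ [x], f y = true := by
        intro y hy
        rcases List.mem_append.1 hy with h | h
        · exact hF y h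
        · simp at h; subst h; exact hx
      rw [ih (F ++ [x]) T hF' hT]
      simp [List.filter_cons, hx]
    · have hx' : f x = false := by simpa using hx
      have hFT : ∀ y ∈ F ++ T, (fun a b => decide ((!f a) < (!f b))) x y = false := by
        intro y hy
        rcases List.mem_append.1 hy with h | h
        · simp [hx', hF y h, Bool.lt_iff]
        · simp [hx', hT y h, Bool.lt_iff]
      have h1 := insertBy_split (fun a b => decide ((!f a) < (!f b))) x (F ++ T) [] hFT
        (by simp)
      simp only [List.append_nil] at h1
      rw [h1, show (F ++ T) ++ [x] = F ++ (T ++ [x]) by simp]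
      have hT' : ∀ y ∈ T ++ [x], f y = false := by
        intro y hy
        rcases List.mem_append.1 hy with h | h
        · exact hT y h
        · simp at h; subst h; exact hx'
      rw [ih F (T ++ [x]) hF hT']
      simp [List.filter_cons, hx']

theorem sorted_bool_key {α : Type} (f : α → Bool) (xs : List α) :
    PySem.List.sorted xs (fun x => !f x) false
      = xs.filter f ++ xs.filter (fun x => !f x) := by
  rw [PySem.List.sorted_eq_foldl_insertBy]
  simpa using foldl_insertBy_bool f xs [] [] (by simp) (by simp)

-- ===== VERDICT (by name: the statement is the Claim_ definition above) =====
theorem filter_payloads_for_stack_spec : Claim_equal_filter_payloads_for_stack := by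
  intro payloads stack _
  unfold Spec_filter_payloads_for_stack filter_payloads_for_stack filter_payloads_for_stack_alt
    stackToSearchString
  set ss := PySem.Str.join " " (stack.map fun kv => PySem.Str.lower kv.2) with hss
  set isRel : String → Bool := fun p =>
    (triggerTable.foldl
      (fun acc tk => if tk.1.any (fun t => PySem.Str.isIn t ss) then acc ++ tk.2 else acc) []).any
      (fun kw => PySem.Str.isIn kw (PySem.Str.lower p)) with hrel
  rw [sorted_bool_key isRel payloads]
  cases hemp : payloads.isEmpty with
  | true =>
    rw [List.isEmpty_iff.1 hemp]; simp
  | false =>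
    simp only [Bool.false_eq_true, if_false]
    rw [fold_pair]
    rw [List.filter_congr (fun p _ => match_eq ss p)]
    rw [List.filter_congr (fun p _ => congrArg (! ·) (match_eq ss p))]
    simp only [List.nil_append, ← hrel]
    cases hr : (payloads.filter isRel).isEmpty with
    | false => simp only [Bool.not_false, if_true]; rfl
    | true =>
      simp only [Bool.not_true, Bool.false_eq_true, if_false]
      rw [List.isEmpty_iff.1 hr, List.nil_append]
      have hall : ∀ p ∈ payloads, isRel p = false := by
        intro p hp
        have := List.filter_eq_nil_iff.1 (List.isEmpty_iff.1 hr) p hp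
        simpa using this
      exact (List.filter_eq_self.2 (fun p hp => by simp [hall p hp])).symm
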